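-- pv_equiv track=rewrite | github.com/DataDog/dd-trace-py | ddtrace/internal/ci_visibility/coverage.py | segments
-- ===== SOURCE A (Python) =====
-- from itertools import groupby
-- from typing import Iterable  # noqa:F401
-- from typing import List  # noqa:F401
-- from typing import Tuple  # noqa:F401
--
-- def segments(lines: Iterable[int]) -> List[Tuple[int, int, int, int, int]]:
--     """Extract the relevant report data for a single file."""
--     _segments = []
--     for _key, g in groupby(enumerate(sorted(lines)), lambda x: x[1] - x[0]):
--         group = list(g)
--         start = group[0][1]
--         end = group[-1][1]
--         _segments.append((start, 0, end, 0, -1))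
--
--     return _segments
-- ===== SOURCE B (Python) =====
-- def segments(lines):
--     """Extract the relevant report data for a single file."""
--     out = []
--     for v in reversed(sorted(lines)):
--         if out and out[-1][0] == v + 1:
--             out[-1] = (v, 0, out[-1][2], 0, -1)
--         else:
--             out.append((v, 0, v, 0, -1))
--     out.reverse()
--     return out
-- ===== Notes on version B (the rewrite author's own statement) =====
-- stated objective: alternative
-- what changed: Builds the segment list back-to-front: iterates the sorted lines in descending order, extending the most recent run downward by rewriting its start field in place (no enumerate/groupby value-minus-index machinery, no start/prev scan state), then reverses the accumulated list.
import Mathlib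
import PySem

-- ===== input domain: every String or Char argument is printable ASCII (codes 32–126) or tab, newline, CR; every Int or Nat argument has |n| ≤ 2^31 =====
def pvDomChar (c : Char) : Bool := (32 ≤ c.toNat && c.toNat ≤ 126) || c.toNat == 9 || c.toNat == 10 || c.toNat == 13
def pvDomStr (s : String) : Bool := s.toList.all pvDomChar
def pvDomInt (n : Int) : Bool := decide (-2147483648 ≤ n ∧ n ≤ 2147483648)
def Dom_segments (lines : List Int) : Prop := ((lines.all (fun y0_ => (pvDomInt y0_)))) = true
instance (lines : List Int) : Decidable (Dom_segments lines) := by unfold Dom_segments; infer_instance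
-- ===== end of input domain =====

-- B builds the segment list back-to-front: it walks the sorted lines in DESCENDING order,
-- extending the most recent run downward by rewriting its start field, then reverses
-- the accumulated list (objective: alternative — same cost, no groupby key trick).

-- ===== PORT A =====
-- itertools.groupby(·, key = x ↦ x.2 - x.1): maximal runs of adjacent elements with equal key.
def pvGroupRuns : List (Int × Int) → List (List (Int × Int))
  | [] => []
  | x :: xs =>
    match pvGroupRuns xs with
    | (y :: ys) :: gs =>
        if x.2 - x.1 = y.2 - y.1 then (x :: y :: ys) :: gs else [x] :: (y :: ys) :: gs
    | gs => [x] :: gs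

-- (start, 0, end, 0, -1) from group[0][1] and group[-1][1]; groups produced by groupby are
-- nonempty, so the .getD default is never used.
def pvMkSeg (g : List (Int × Int)) : Int × Int × Int × Int × Int :=
  (((PySem.List.pyGet? g 0).getD (0, 0)).2, 0, ((PySem.List.pyGet? g (-1)).getD (0, 0)).2, 0, -1)

def segments (lines : List Int) : List (Int × Int × Int × Int × Int) :=
  (pvGroupRuns (PySem.List.enumerate (PySem.List.sorted lines id))).map pvMkSeg

-- ===== PORT B =====
-- the loop body of Source B; the loop state `out` is held in reversed order (Python's out[-1]
-- is the head, out.append is cons), so Source B's final out.reverse() returns the accumulator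
-- exactly as built: out[-1] is inspected (out and out[-1][0] == v + 1) and either rewritten
-- in place (out[-1] = (v, 0, out[-1][2], 0, -1)) or a new segment (v, 0, v, 0, -1) appended.
def pvStepB (out : List (Int × Int × Int × Int × Int)) (v : Int) :
    List (Int × Int × Int × Int × Int) :=
  match out with
  | (a, b, c, d, e) :: rest =>
      if a = v + 1 then (v, 0, c, 0, -1) :: rest
      else (v, 0, v, 0, -1) :: (a, b, c, d, e) :: rest
  | [] => [(v, 0, v, 0, -1)]

-- for v in reversed(sorted(lines)): …  then out.reverse(); return out
def segments_alt (lines : List Int) : List (Int × Int × Int × Int × Int) :=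
  ((PySem.List.sorted lines id).reverse).foldl pvStepB []

-- ===== PRECONDITION & SPEC =====
def Spec_segments (lines : List Int) (out : List (Int × Int × Int × Int × Int)) : Prop := out = segments_alt lines
instance (lines : List Int) (out : List (Int × Int × Int × Int × Int)) : Decidable (Spec_segments lines out) := by unfold Spec_segments; infer_instance

-- ===== CLAIM (what is proved, stated in full; the proofs are below) =====
def Claim_equal_segments : Prop := ∀ (lines : List Int), Dom_segments lines → Spec_segments lines (segments lines)

-- ===== LEMMAS AND PROOFS =====

-- the left-to-right scan carrying (start, prev): the common reference shape of both ports
def pvScan (start prev : Int) : List Int → List (Int × Int × Int × Int × Int)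
  | [] => [(start, 0, prev, 0, -1)]
  | v :: vs =>
      if v = prev + 1 then pvScan start v vs
      else (start, 0, prev, 0, -1) :: pvScan v v vs

-- replace the first segment's start component
def pvUpd (a : Int) : List (Int × Int × Int × Int × Int) → List (Int × Int × Int × Int × Int)
  | [] => []
  | (_, b, c, d, e) :: t => (a, b, c, d, e) :: t

theorem pvScan_congr (vs : List Int) : ∀ (s₁ s₂ prev : Int),
    pvScan s₁ prev vs = pvUpd s₁ (pvScan s₂ prev vs) := by
  induction vs with
  | nil => intro s₁ s₂ prev; simp [pvScan, pvUpd]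
  | cons v vs ih =>
    intro s₁ s₂ prev
    by_cases h : v = prev + 1
    · simp only [pvScan, if_pos h]; exact ih s₁ s₂ v
    · simp [pvScan, h, pvUpd]

theorem pvGroupRuns_cons_eq (x : Int × Int) (xs : List (Int × Int)) :
    pvGroupRuns (x :: xs) =
      match pvGroupRuns xs with
      | (y :: ys) :: gs =>
          if x.2 - x.1 = y.2 - y.1 then (x :: y :: ys) :: gs else [x] :: (y :: ys) :: gs
      | gs => [x] :: gs := rfl

theorem pvGroupRuns_cons (x : Int × Int) (xs : List (Int × Int)) :
    ∃ ys gs, pvGroupRuns (x :: xs) = (x :: ys) :: gs := by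
  cases h : pvGroupRuns xs with
  | nil => exact ⟨[], [], by simp [pvGroupRuns, h]⟩
  | cons g gs =>
    cases g with
    | nil => exact ⟨[], [] :: gs, by simp [pvGroupRuns, h]⟩
    | cons y ys =>
      by_cases hk : x.2 - x.1 = y.2 - y.1
      · exact ⟨y :: ys, gs, by simp [pvGroupRuns, h, hk]⟩
      · exact ⟨[], (y :: ys) :: gs, by simp [pvGroupRuns, h, hk]⟩

theorem pvGetLast_cons (x z : Int × Int) (ys : List (Int × Int)) :
    PySem.List.pyGet? (x :: z :: ys) (-1) = PySem.List.pyGet? (z :: ys) (-1) := by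
  rw [PySem.List.pyGet?_neg_one, PySem.List.pyGet?_neg_one, List.getLast?_cons_cons]

theorem pvMapSeg_upd (x z : Int × Int) (ys : List (Int × Int))
    (gs : List (List (Int × Int))) :
    ((x :: z :: ys) :: gs).map pvMkSeg = pvUpd x.2 (((z :: ys) :: gs).map pvMkSeg) := by
  simp only [List.map_cons, pvMkSeg, pvGetLast_cons, PySem.List.pyGet?_zero_cons, pvUpd,
    Option.getD_some]

-- A's groupby pipeline computes the left-to-right scan
theorem pvMain (vs : List Int) : ∀ (i v : Int),
    (pvGroupRuns (PySem.List.enumerate (v :: vs) i)).map pvMkSeg = pvScan v v vs := by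
  induction vs with
  | nil =>
    intro i v
    simp [PySem.List.enumerate_cons, PySem.List.enumerate_nil, pvGroupRuns, pvScan, pvMkSeg,
      PySem.List.pyGet?_neg_one]
  | cons w ws ih =>
    intro i v
    simp only [PySem.List.enumerate_cons] at ih ⊢
    obtain ⟨ys, gs, hg⟩ := pvGroupRuns_cons (i + 1, w) (PySem.List.enumerate ws (i + 1 + 1))
    by_cases h : w = v + 1
    · have hkey : v - i = w - (i + 1) := by omega
      rw [show pvGroupRuns ((i, v) :: (i + 1, w) :: PySem.List.enumerate ws (i + 1 + 1))
            = ((i, v) :: (i + 1, w) :: ys) :: gs from by rw [pvGroupRuns_cons_eq, hg]; simp [hkey]]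
      rw [pvMapSeg_upd, ← hg, ih (i + 1) w]
      rw [show pvScan v v (w :: ws) = pvScan v w ws from by simp [pvScan, h]]
      exact (pvScan_congr ws v w w).symm
    · have hkey : ¬ v - i = w - (i + 1) := by omega
      rw [show pvGroupRuns ((i, v) :: (i + 1, w) :: PySem.List.enumerate ws (i + 1 + 1))
            = [(i, v)] :: ((i + 1, w) :: ys) :: gs from by rw [pvGroupRuns_cons_eq, hg]; simp [hkey]]
      rw [show pvScan v v (w :: ws) = (v, 0, v, 0, -1) :: pvScan w w ws from by
        simp [pvScan, h]]
      rw [List.map_cons, ← hg, ih (i + 1) w]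
      simp [pvMkSeg, PySem.List.pyGet?_neg_one]

-- the first segment of a scan starts at its start argument
theorem pvScan_head (vs : List Int) : ∀ (s p : Int),
    ∃ e t, pvScan s p vs = (s, 0, e, 0, -1) :: t := by
  induction vs with
  | nil => intro s p; exact ⟨p, [], rfl⟩
  | cons v vs ih =>
    intro s p
    by_cases h : v = p + 1
    · subst h
      obtain ⟨e, t, ht⟩ := ih s (p + 1)
      exact ⟨e, t, by simp [pvScan, ht]⟩
    · exact ⟨p, pvScan v v vs, by simp [pvScan, h]⟩

-- folding B's step over the descending list yields the left-to-right scan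
theorem pvFoldB (ws : List Int) : ∀ (w : Int),
    (w :: ws).reverse.foldl pvStepB [] = pvScan w w ws := by
  induction ws with
  | nil => intro w; simp [pvStepB, pvScan]
  | cons x xs ih =>
    intro w
    have hrw : (w :: x :: xs).reverse.foldl pvStepB []
        = pvStepB ((x :: xs).reverse.foldl pvStepB []) w := by
      simp [List.foldl_append]
    obtain ⟨e, t, ht⟩ := pvScan_head xs x x
    rw [hrw, ih x, ht, pvStepB]
    by_cases h : x = w + 1
    · rw [if_pos h]
      rw [show pvScan w w (x :: xs) = pvScan w x xs from by simp [pvScan, h],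
        pvScan_congr xs w x x, ht]
      rfl
    · rw [if_neg h]
      rw [show pvScan w w (x :: xs) = (w, 0, w, 0, -1) :: pvScan x x xs from by
        simp [pvScan, h], ht]

-- ===== VERDICT (by name: the statement is the Claim_ definition above) =====
theorem segments_spec : Claim_equal_segments := by
  intro lines _
  unfold Spec_segments segments segments_alt
  cases h : PySem.List.sorted lines id with
  | nil => simp [PySem.List.enumerate_nil, pvGroupRuns]
  | cons v vs =>
    rw [pvFoldB vs v]
    exact pvMain vs 0 v
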